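-- pv_equiv track=rewrite | github.com/hejizi-github/clawdbot_copy | trajeval/trajeval/metrics.py | _is_subpattern
-- ===== SOURCE A (Python) =====
-- def _is_subpattern(short: tuple, long: tuple) -> bool:
--     """Check if short is a contiguous subsequence of long."""
--     ls, ll = len(short), len(long)
--     if ls >= ll:
--         return False
--     for i in range(ll - ls + 1):
--         if long[i : i + ls] == short:
--             return True
--     return False
-- ===== SOURCE B (Python) =====
-- _MOD = (1 << 61) - 1
-- _BASE = 131
--
--
-- def _is_subpattern(short: tuple, long: tuple) -> bool:
--     """Check if short is a contiguous subsequence of long (Rabin-Karp rolling hash)."""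
--     ls, ll = len(short), len(long)
--     if ls >= ll:
--         return False
--     pw = 1
--     for _ in range(ls - 1):
--         pw = pw * _BASE % _MOD
--     target = 0
--     for x in short:
--         target = (target * _BASE + x) % _MOD
--     h = 0
--     for x in long[:ls]:
--         h = (h * _BASE + x) % _MOD
--     i = 0
--     while True:
--         if h == target and long[i : i + ls] == short:
--             return True
--         if i == ll - ls:
--             return False
--         h = ((h - long[i] * pw) * _BASE + long[i + ls]) % _MOD
--         i += 1
-- ===== Notes on version B (the rewrite author's own statement) =====
-- stated objective: alternative
-- what changed: Replaced the per-position slice comparison with Rabin-Karp: a rolling polynomial hash over a sliding window, with a full comparison only when the hash matches the pattern hash.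
import Mathlib
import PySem

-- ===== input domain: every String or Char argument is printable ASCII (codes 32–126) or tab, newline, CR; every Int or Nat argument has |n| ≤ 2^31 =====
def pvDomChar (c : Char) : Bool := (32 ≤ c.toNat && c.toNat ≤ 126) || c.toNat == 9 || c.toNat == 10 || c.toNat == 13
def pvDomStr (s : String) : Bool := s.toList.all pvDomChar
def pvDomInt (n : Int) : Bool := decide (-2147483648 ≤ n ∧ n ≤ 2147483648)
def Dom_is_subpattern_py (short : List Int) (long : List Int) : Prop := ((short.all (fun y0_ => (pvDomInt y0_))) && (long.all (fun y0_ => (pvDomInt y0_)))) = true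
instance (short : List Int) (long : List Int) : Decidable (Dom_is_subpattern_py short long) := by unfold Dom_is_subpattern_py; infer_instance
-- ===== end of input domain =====

-- B replaces A's per-position slice comparison by a Rabin-Karp rolling hash (alternative algorithm; equality of return values is what is proved).

-- ===== PORT A =====
-- for i in range(ll - ls + 1): if long[i:i+ls] == short: return True
def pvALoop (short long : List Int) (ls : Int) : List Int → Bool
  | [] => false
  | i :: rest =>
    if PySem.List.slice long (some i) (some (i + ls)) == short then true
    else pvALoop short long ls rest

def is_subpattern_py (short : List Int) (long : List Int) : Bool :=
  let ls : Int := short.length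
  let ll : Int := long.length
  if ls ≥ ll then false
  else pvALoop short long ls (PySem.List.pyRange 0 (ll - ls + 1) 1)

-- ===== PORT B =====
def pvP : Int := 2305843009213693951
def pvB : Int := 131

-- one step of the polynomial hash: h = (h * _BASE + x) % _MOD
def pvHStep (h x : Int) : Int := PySem.Int.mod (h * pvB + x) pvP

-- the while-True loop of B, with fuel (never exhausted: the loop exits at i = ll - ls)
def pvBLoop (short long : List Int) (ls ll target pw : Int) : Int → Int → Nat → Bool
  | _, _, 0 => false
  | h, i, f + 1 =>
    if h == target && PySem.List.slice long (some i) (some (i + ls)) == short then true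
    else if i == ll - ls then false
    else pvBLoop short long ls ll target pw
      (PySem.Int.mod ((h - (PySem.List.pyGetD long i 0) * pw) * pvB + PySem.List.pyGetD long (i + ls) 0) pvP)
      (i + 1) f

def is_subpattern_py_alt (short : List Int) (long : List Int) : Bool :=
  let ls : Int := short.length
  let ll : Int := long.length
  if ls ≥ ll then false
  else
    let pw := (PySem.List.pyRange 0 (ls - 1) 1).foldl (fun pw _ => PySem.Int.mod (pw * pvB) pvP) 1
    let target := short.foldl pvHStep 0
    let h := (PySem.List.slice long none (some ls)).foldl pvHStep 0
    pvBLoop short long ls ll target pw h 0 ((ll - ls).toNat + 1)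

-- ===== PRECONDITION & SPEC =====
def Spec_is_subpattern_py (short : List Int) (long : List Int) (out : Bool) : Prop := out = is_subpattern_py_alt short long
instance (short : List Int) (long : List Int) (out : Bool) : Decidable (Spec_is_subpattern_py short long out) := by unfold Spec_is_subpattern_py; infer_instance

-- ===== CLAIM (what is proved, stated in full; the proofs are below) =====
def Claim_equal_is_subpattern_py : Prop := ∀ (short : List Int) (long : List Int), Dom_is_subpattern_py short long → Spec_is_subpattern_py short long (is_subpattern_py short long)

-- ===== LEMMAS AND PROOFS =====

def pvPoly (l : List Int) : Int := l.foldl (fun h x => h * pvB + x) 0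
def pvHash (l : List Int) : Int := l.foldl pvHStep 0

theorem pvP_pos : (0 : Int) < pvP := by norm_num [pvP]

theorem pvMod_eq (a : Int) : PySem.Int.mod a pvP = a % pvP :=
  PySem.Int.mod_eq_emod_of_pos pvP_pos

-- the hash fold is congruent (mod pvP) to the pure polynomial fold
theorem pvHash_cong (l : List Int) : ∀ (a b : Int), a % pvP = b % pvP →
    (l.foldl pvHStep a) % pvP = (l.foldl (fun h x => h * pvB + x) b) % pvP := by
  induction l with
  | nil => intro a b h; simpa using h
  | cons x t ih =>
    intro a b h
    simp only [List.foldl_cons]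
    apply ih
    rw [pvHStep, pvMod_eq, Int.emod_emod_of_dvd _ dvd_rfl]
    exact (Int.ModEq.add (Int.ModEq.mul h rfl) (rfl : x % pvP = x % pvP))

theorem pvHash_modEq (l : List Int) : pvHash l % pvP = pvPoly l % pvP :=
  pvHash_cong l 0 0 rfl

theorem pvHStep_reduced (h x : Int) : (pvHStep h x) % pvP = pvHStep h x := by
  rw [pvHStep, pvMod_eq, Int.emod_emod_of_dvd _ dvd_rfl]

theorem pvHash_reduced (l : List Int) (hne : l ≠ []) : pvHash l % pvP = pvHash l := by
  induction l using List.reverseRecOn with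
  | nil => simp at hne
  | append_singleton t y _ =>
    simp only [pvHash, List.foldl_append, List.foldl_cons, List.foldl_nil]
    exact pvHStep_reduced _ _

theorem pvPoly_acc (l : List Int) : ∀ (a : Int),
    l.foldl (fun h x => h * pvB + x) a = a * pvB ^ l.length + pvPoly l := by
  induction l with
  | nil => intro a; simp [pvPoly]
  | cons x t ih =>
    intro a
    simp only [List.foldl_cons, List.length_cons]
    rw [ih (a * pvB + x)]
    have h0 : pvPoly (x :: t) = (0 * pvB + x) * pvB ^ t.length + pvPoly t := by
      rw [pvPoly, List.foldl_cons, ih]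
    rw [h0]
    ring

theorem pvPoly_cons (x : Int) (m : List Int) :
    pvPoly (x :: m) = x * pvB ^ m.length + pvPoly m := by
  rw [pvPoly, List.foldl_cons, pvPoly_acc]; ring_nf

theorem pvPoly_concat (m : List Int) (y : Int) :
    pvPoly (m ++ [y]) = pvPoly m * pvB + y := by
  simp [pvPoly, List.foldl_append]

-- the pw fold computes (a * pvB ^ len) % pvP up to congruence
theorem pvPw_cong (l : List Int) : ∀ (a : Int),
    (l.foldl (fun pw _ => PySem.Int.mod (pw * pvB) pvP) a) % pvP = (a * pvB ^ l.length) % pvP := by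
  induction l with
  | nil => intro a; simp
  | cons x t ih =>
    intro a
    simp only [List.foldl_cons, List.length_cons]
    rw [ih]
    calc (PySem.Int.mod (a * pvB) pvP * pvB ^ t.length) % pvP
        = (a * pvB * pvB ^ t.length) % pvP := by
          rw [pvMod_eq]
          exact Int.ModEq.mul (Int.emod_emod_of_dvd _ dvd_rfl) rfl
      _ = (a * pvB ^ (t.length + 1)) % pvP := by ring_nf

-- window of length ls starting at i
def pvWin (long : List Int) (ls i : Nat) : List Int := (long.drop i).take ls

-- the rolling-hash step turns the hash of window i into the hash of window i+1
theorem pvRoll (long : List Int) (k i : Nat) (hlen : i + (k + 1) < long.length)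
    (pw : Int) (hpw : pw % pvP = (pvB ^ k) % pvP) :
    PySem.Int.mod ((pvHash (pvWin long (k + 1) i) - long.getD i 0 * pw) * pvB
        + long.getD (i + (k + 1)) 0) pvP = pvHash (pvWin long (k + 1) (i + 1)) := by
  have hi : i < long.length := by omega
  have hm : ((long.drop (i + 1)).take k).length = k := by
    simp only [List.length_take, List.length_drop]
    omega
  have hw1 : pvWin long (k + 1) i = long[i] :: (long.drop (i + 1)).take k := by
    rw [pvWin, List.drop_eq_getElem_cons hi, List.take_succ_cons]
  have hw2 : pvWin long (k + 1) (i + 1) = (long.drop (i + 1)).take k ++ [long[i + (k + 1)]] := by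
    rw [pvWin, List.take_add_one]
    congr 1
    rw [List.getElem?_drop, List.getElem?_eq_getElem (by omega : i + 1 + k < long.length)]
    have h' : i + 1 + k = i + (k + 1) := by omega
    simp [h']
  have hne : pvWin long (k + 1) (i + 1) ≠ [] := by rw [hw2]; simp
  rw [pvMod_eq, ← pvHash_reduced _ hne]
  rw [List.getD_eq_getElem _ _ hi, List.getD_eq_getElem _ _ hlen]
  have h1 : Int.ModEq pvP (pvHash (pvWin long (k + 1) i)) (pvPoly (pvWin long (k + 1) i)) :=
    pvHash_modEq _
  have h2 : Int.ModEq pvP pw (pvB ^ k) := hpw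
  have hmid : ((pvHash (pvWin long (k + 1) i) - long[i] * pw) * pvB + long[i + (k + 1)]) % pvP
      = ((pvPoly (pvWin long (k + 1) i) - long[i] * (pvB ^ k)) * pvB + long[i + (k + 1)]) % pvP :=
    ((h1.sub (Int.ModEq.mul_left long[i] h2)).mul_right pvB).add_right long[i + (k + 1)]
  rw [hmid]
  have hpoly : (pvPoly (pvWin long (k + 1) i) - long[i] * (pvB ^ k)) * pvB + long[i + (k + 1)]
      = pvPoly (pvWin long (k + 1) (i + 1)) := by
    rw [hw1, hw2, pvPoly_cons, hm, pvPoly_concat]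
    ring
  rw [hpoly]
  exact (pvHash_modEq _).symm

-- the B loop, under its hash invariant, tests every window from i to n
theorem pvBLoop_eq (short long : List Int) (n : Nat)
    (hls : short.length < long.length) (hn : n = long.length - short.length)
    (target pw : Int) (ht : target = pvHash short)
    (hpw : pw % pvP = (pvB ^ (short.length - 1)) % pvP) :
    ∀ (f i : Nat) (h : Int), i + f = n + 1 → h = pvHash (pvWin long short.length i) →
      pvBLoop short long (short.length : Int) (long.length : Int) target pw h (i : Int) f
        = (List.range' i f).any (fun j => pvWin long short.length j == short) := by
  intro f
  induction f with
  | zero => intro i h _ _; simp [pvBLoop]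
  | succ f ih =>
    intro i h hif hh
    rw [pvBLoop, List.range'_succ, List.any_cons]
    rw [PySem.List.slice_natCast_add long i short.length]
    show (if (h == target && (pvWin long short.length i == short)) = true then true else _) = _
    by_cases he : pvWin long short.length i = short
    · have htt : (h == target) = true := by rw [hh, ht, he]; simp
      simp [htt, he]
    · have hq : (pvWin long short.length i == short) = false := by simp [he]
      rw [hq, Bool.and_false, if_neg (by simp), Bool.false_or]
      have hcast : (long.length : Int) - (short.length : Int) = (n : Int) := by
        rw [hn]
        push_cast [Nat.cast_sub (le_of_lt hls)]
        ring
      by_cases hin : i = n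
      · have hc : ((i : Int) == (long.length : Int) - (short.length : Int)) = true := by
          rw [hcast, hin]; simp
        have hf0 : f = 0 := by omega
        rw [hc]
        simp [hf0]
      · have hc : ((i : Int) == (long.length : Int) - (short.length : Int)) = false := by
          rw [hcast]
          simp only [beq_eq_false_iff_ne, ne_eq, Int.natCast_inj]
          exact hin
        rw [hc, if_neg (by simp)]
        have hiltn : i < n := by omega
        obtain ⟨k, hk⟩ : ∃ k, short.length = k + 1 := by
          rcases Nat.eq_zero_or_pos short.length with h0 | hpos
          · exfalso
            apply he
            have hsnil : short = [] := List.eq_nil_of_length_eq_zero h0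
            rw [pvWin, h0, List.take_zero, hsnil]
          · exact ⟨short.length - 1, by omega⟩
        have hroll : PySem.Int.mod ((h - long.getD i 0 * pw) * pvB
            + long.getD (i + short.length) 0) pvP = pvHash (pvWin long short.length (i + 1)) := by
          rw [hk, hh, hk]
          exact pvRoll long k i (by omega) pw (by simpa [hk] using hpw)
        have harg : (i : Int) + (short.length : Int) = ((i + short.length : Nat) : Int) := by
          push_cast; ring
        have hsucc : (i : Int) + 1 = ((i + 1 : Nat) : Int) := by push_cast; ring
        rw [harg, hsucc, PySem.List.pyGetD_natCast, PySem.List.pyGetD_natCast]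
        exact ih (i + 1) _ (by omega) hroll

theorem pvAny_ext {a : Type} (l : List a) (p q : a → Bool) (h : ∀ x ∈ l, p x = q x) :
    l.any p = l.any q := by
  induction l with
  | nil => rfl
  | cons x t ih =>
    simp only [List.any_cons, h x (by simp), ih (fun y hy => h y (by simp [hy]))]

-- A's loop is an 'any' over its index list
theorem pvALoop_any (short long : List Int) (ls : Int) (idxs : List Int) :
    pvALoop short long ls idxs
      = idxs.any (fun i => PySem.List.slice long (some i) (some (i + ls)) == short) := by
  induction idxs with
  | nil => rfl
  | cons a t ih =>
    rw [pvALoop, List.any_cons]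
    cases hb : (PySem.List.slice long (some a) (some (a + ls)) == short) <;> simp [ih]

theorem pv_main (short long : List Int) :
    is_subpattern_py short long = is_subpattern_py_alt short long := by
  simp only [is_subpattern_py, is_subpattern_py_alt]
  by_cases hge : (short.length : Int) ≥ (long.length : Int)
  · simp [hge]
  · have hls : short.length < long.length := by exact_mod_cast not_le.mp hge
    rw [if_neg hge, if_neg hge]
    have hcast : ((long.length : Int) - (short.length : Int) + 1 - 0).toNat
        = (long.length - short.length) + 1 := by omega
    -- A side
    rw [pvALoop_any, PySem.List.pyRange_one, hcast, List.any_map]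
    have hA : ∀ j ∈ List.range ((long.length - short.length) + 1),
        ((fun i => PySem.List.slice long (some i) (some (i + (short.length : Int))) == short) ∘
          (fun k : Nat => (0 : Int) + (k : Int))) j
          = (pvWin long short.length j == short) := by
      intro j _
      simp only [Function.comp, zero_add]
      rw [PySem.List.slice_natCast_add long j short.length]
      rfl
    rw [pvAny_ext _ _ _ hA]
    -- B side
    have htoNat : ((long.length : Int) - (short.length : Int)).toNat
        = long.length - short.length := by omega
    rw [htoNat]
    have hpw : (((PySem.List.pyRange 0 ((short.length : Int) - 1) 1).foldl
          (fun pw _ => PySem.Int.mod (pw * pvB) pvP) 1) % pvP)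
        = (pvB ^ (short.length - 1)) % pvP := by
      rw [pvPw_cong, one_mul, PySem.List.length_pyRange_one]
      have he : (((short.length : Int) - 1) - 0).toNat = short.length - 1 := by omega
      rw [he]
    have hB := pvBLoop_eq short long (long.length - short.length) hls rfl
      (short.foldl pvHStep 0)
      ((PySem.List.pyRange 0 ((short.length : Int) - 1) 1).foldl
        (fun pw _ => PySem.Int.mod (pw * pvB) pvP) 1)
      rfl hpw ((long.length - short.length) + 1) 0
      ((PySem.List.slice long none (some (short.length : Int))).foldl pvHStep 0)
      (by omega)
      (by rw [PySem.List.slice_to_natCast]; rfl)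
    rw [List.range_eq_range']
    exact hB.symm

-- ===== VERDICT (by name: the statement is the Claim_ definition above) =====
theorem is_subpattern_py_spec : Claim_equal_is_subpattern_py := by
  intro short long _
  unfold Spec_is_subpattern_py
  exact pv_main short long
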